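-- pv_equiv track=rewrite | github.com/Hunterdii/GeeksforGeeks-POTD | January 2026 GFG SOLUTION/January-16.py | minMen
-- ===== SOURCE A (Python) =====
-- def minMen(arr):
--     n = len(arr)
--     v = []
--     for i in range(n):
--         if arr[i] != -1:
--             v.append((max(0, i - arr[i]), min(n - 1, i + arr[i])))
--     if not v: return -1
--     v.sort()
--     cnt, pos, i = 0, -1, 0
--     while pos < n - 1:
--         if i >= len(v) or v[i][0] > pos + 1: return -1
--         reach = pos
--         while i < len(v) and v[i][0] <= pos + 1:
--             reach = max(reach, v[i][1])
--             i += 1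
--         cnt += 1
--         pos = reach
--     return cnt
-- ===== SOURCE B (Python) =====
-- def minMen(arr):
--     # Bucket the max reach per clamped start index, then a linear greedy sweep
--     # (jump-game style) instead of building, sorting and merging interval pairs.
--     n = len(arr)
--     best = [-1] * n
--     any_man = False
--     for i, a in enumerate(arr):
--         if a != -1:
--             any_man = True
--             l = max(0, i - a)
--             if l < n:
--                 r = min(n - 1, i + a)
--                 if r > best[l]:
--                     best[l] = r
--     if not any_man:
--         return -1
--     cnt, covered, far, i = 0, -1, -1, 0
--     while covered < n - 1:
--         while i < len(best) and i <= covered + 1: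
--             if best[i] > far:
--                 far = best[i]
--             i += 1
--         if far <= covered:
--             return -1
--         cnt += 1
--         covered = far
--     return cnt
-- ===== Notes on version B (the rewrite author's own statement) =====
-- stated objective: faster
-- what changed: Instead of materialising an interval pair per position, sorting the pairs and merging with a two-pointer greedy, B buckets the maximum clamped reach per clamped start index into one array and then does a single linear jump-game greedy sweep over that array, removing the sort entirely.
import Mathlib
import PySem

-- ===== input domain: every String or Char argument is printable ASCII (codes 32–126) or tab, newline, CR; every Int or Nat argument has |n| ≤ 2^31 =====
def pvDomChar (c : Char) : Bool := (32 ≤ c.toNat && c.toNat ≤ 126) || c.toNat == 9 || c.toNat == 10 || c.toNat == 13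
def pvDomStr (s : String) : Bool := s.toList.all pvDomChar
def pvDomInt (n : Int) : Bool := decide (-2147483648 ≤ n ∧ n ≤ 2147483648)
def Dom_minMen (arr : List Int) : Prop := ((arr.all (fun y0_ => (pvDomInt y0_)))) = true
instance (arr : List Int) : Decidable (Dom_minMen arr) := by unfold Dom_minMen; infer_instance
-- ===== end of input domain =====

-- B replaces A's build-sort-merge interval greedy by bucketing the max clamped reach per
-- clamped start index and a single linear jump-game greedy sweep (no sort); same result.


-- ===== PORT A =====
-- 'for i in range(n): if arr[i] != -1: v.append((max(0, i-arr[i]), min(n-1, i+arr[i])))'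
def minMenIvs (n : Int) (arr : List Int) : List (Int × Int) :=
  (PySem.List.enumerate arr).foldl
    (fun v p => if p.2 ≠ -1 then v ++ [(max 0 (p.1 - p.2), min (n - 1) (p.1 + p.2))] else v) []

-- inner 'while i < len(v) and v[i][0] <= pos+1: reach = max(reach, v[i][1]); i += 1'
-- (the index i is carried as the remaining suffix v[i:]).
def minMenInner (pos : Int) : Int → List (Int × Int) → Int × List (Int × Int)
  | reach, [] => (reach, [])
  | reach, (l, r) :: t =>
      if l ≤ pos + 1 then minMenInner pos (max reach r) t else (reach, (l, r) :: t)

-- termination helper for the outer while loop (cited by decreasing_by)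
theorem minMenInner_len (pos : Int) : ∀ (reach : Int) (xs : List (Int × Int)),
    (minMenInner pos reach xs).2.length ≤ xs.length := by
  intro reach xs
  induction xs generalizing reach with
  | nil => simp [minMenInner]
  | cons p t ih =>
      obtain ⟨l, r⟩ := p
      by_cases h : l ≤ pos + 1
      · simp only [minMenInner, if_pos h]
        exact le_trans (ih _) (Nat.le_succ _)
      · simp [minMenInner, if_neg h]

-- outer 'while pos < n - 1: ...'
def minMenLoop (n cnt pos : Int) (rest : List (Int × Int)) : Int :=
  if pos < n - 1 then
    match rest with
    | [] => -1
    | (l, r) :: t =>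
        if h : l > pos + 1 then -1
        else
          let s := minMenInner pos pos ((l, r) :: t)
          minMenLoop n (cnt + 1) s.1 s.2
  else cnt
termination_by rest.length
decreasing_by
  simp only [minMenInner, if_pos (by omega : l ≤ pos + 1)]
  exact Nat.lt_succ_of_le (minMenInner_len pos (max pos r) t)

def minMen (arr : List Int) : Int :=
  let n : Int := arr.length
  let v := minMenIvs n arr
  if v = [] then -1
  else minMenLoop n 0 (-1) (PySem.List.sorted2 v (fun p => p.1) (fun p => p.2))

-- ===== PORT B =====
-- builds (best, any_man): best[l] = max clamped reach of a man whose clamped start is l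
def minMenBuild (n : Int) (arr : List Int) : List Int × Bool :=
  (PySem.List.enumerate arr).foldl
    (fun st p =>
      if p.2 ≠ -1 then
        let l := max 0 (p.1 - p.2)
        if l < n then
          let r := min (n - 1) (p.1 + p.2)
          if r > st.1.getD l.toNat (-1) then (st.1.set l.toNat r, true) else (st.1, true)
        else (st.1, true)
      else st)
    (List.replicate arr.length (-1), false)

-- inner 'while i < len(best) and i <= covered + 1: far = max(far, best[i]); i += 1'
def minMenInnerB (covered : Int) (best : List Int) : Int → Nat → Int × Nat
  | far, i =>
    if i < best.length ∧ (i : Int) ≤ covered + 1 then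
      minMenInnerB covered best
        (if best.getD i (-1) > far then best.getD i (-1) else far) (i + 1)
    else (far, i)
termination_by far i => best.length - i
decreasing_by omega

-- outer 'while covered < n - 1: ...'
def minMenLoopB (n : Int) (best : List Int) (cnt covered far : Int) (i : Nat) : Int :=
  if covered < n - 1 then
    match minMenInnerB covered best far i with
    | (far', i') => if far' ≤ covered then -1 else minMenLoopB n best (cnt + 1) far' far' i'
  else cnt
termination_by (n - 1 - covered).toNat
decreasing_by omega

def minMen_alt (arr : List Int) : Int :=
  let n : Int := arr.length
  let st := minMenBuild n arr
  if st.2 = false then -1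
  else minMenLoopB n st.1 0 (-1) (-1) 0

-- ===== PRECONDITION & SPEC =====
def Spec_minMen (arr : List Int) (out : Int) : Prop := out = minMen_alt arr
instance (arr : List Int) (out : Int) : Decidable (Spec_minMen arr out) := by unfold Spec_minMen; infer_instance

-- ===== CLAIM (what is proved, stated in full; the proofs are below) =====
def Claim_equal_minMen : Prop := ∀ (arr : List Int), Dom_minMen arr → Spec_minMen arr (minMen arr)

-- ===== LEMMAS AND PROOFS =====

-- proof-side abbreviations: the interval of one enumerated entry, the interval list,
-- the fold step of A's greedy, and the two components of B's building fold
def mmIv (n : Int) (p : Int × Int) : Int × Int := (max 0 (p.1 - p.2), min (n - 1) (p.1 + p.2))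

def mmFv (n : Int) (es : List (Int × Int)) : List (Int × Int) :=
  (es.filter (fun p => decide (p.2 ≠ -1))).map (mmIv n)

def mmStep (pos a : Int) (p : Int × Int) : Int := if p.1 ≤ pos + 1 then max a p.2 else a

def mmB1 (n : Int) (best : List Int) (p : Int × Int) : List Int :=
  if p.2 ≠ -1 then
    if max 0 (p.1 - p.2) < n then
      if min (n - 1) (p.1 + p.2) > best.getD (max 0 (p.1 - p.2)).toNat (-1) then
        best.set (max 0 (p.1 - p.2)).toNat (min (n - 1) (p.1 + p.2))
      else best
    else best
  else best

def mmB2 (b : Bool) (p : Int × Int) : Bool := if p.2 ≠ -1 then true else b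

-- running-max utilities
theorem mm_foldl_max_pull : ∀ (w : List Int) (a c : Int), w.foldl max (max a c) = max (w.foldl max a) c := by
  intro w
  induction w with
  | nil => intro a c; rfl
  | cons x t ih =>
      intro a c
      simp only [List.foldl_cons]
      rw [max_right_comm a c x]
      exact ih (max a x) c

theorem mm_foldl_max_le : ∀ (w : List Int) (c a : Int), a ≤ c → (∀ x ∈ w, x ≤ c) → w.foldl max a ≤ c := by
  intro w
  induction w with
  | nil => intro c a ha _; exact ha
  | cons x t ih =>
      intro c a ha hall
      simp only [List.foldl_cons]
      exact ih c (max a x) (max_le ha (hall x (by simp))) (fun y hy => hall y (by simp [hy]))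

theorem mm_foldl_max_set : ∀ (xs : List Int) (j : Nat) (r init : Int) (hj : j < xs.length),
    xs[j] ≤ r → (xs.set j r).foldl max init = max (xs.foldl max init) r := by
  intro xs
  induction xs with
  | nil => intro j r init hj; simp at hj
  | cons x t ih =>
      intro j r init hj hx
      cases j with
      | zero =>
          simp only [List.set_cons_zero, List.foldl_cons]
          have hxr : (x :: t)[0] = x := rfl
          rw [hxr] at hx
          have : max init r = max (max init x) r := by
            rw [max_assoc, max_eq_right hx]
          rw [this]
          exact mm_foldl_max_pull t (max init x) r
      | succ j =>
          simp only [List.set_cons_succ, List.foldl_cons]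
          exact ih j r (max init x) (by simpa using hj) (by simpa using hx)

theorem mm_replicate_fold (m k : Nat) : ((List.replicate m (-1 : Int)).take k).foldl max (-1) = -1 := by
  have h1 : (-1 : Int) ≤ -1 := le_refl _
  refine le_antisymm (mm_foldl_max_le _ _ _ h1 ?_) ((PySem.List.le_foldl_max _ _).1)
  intro x hx
  have := List.mem_of_mem_take hx
  simp [List.eq_of_mem_replicate this]

-- A's greedy fold step: skipped/absorbed segments and right-commutativity
theorem mm_step_skip (pos : Int) : ∀ (xs : List (Int × Int)) (a : Int),
    (∀ p ∈ xs, ¬ p.1 ≤ pos + 1) → xs.foldl (mmStep pos) a = a := by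
  intro xs
  induction xs with
  | nil => intro a _; rfl
  | cons p t ih =>
      intro a hall
      simp only [List.foldl_cons, mmStep, if_neg (hall p (by simp))]
      exact ih a (fun q hq => hall q (by simp [hq]))

theorem mm_step_pre (pos : Int) : ∀ (pre : List (Int × Int)),
    (∀ p ∈ pre, p.2 ≤ pos) → pre.foldl (mmStep pos) pos = pos := by
  intro pre
  induction pre with
  | nil => intro _; rfl
  | cons p t ih =>
      intro hall
      simp only [List.foldl_cons, mmStep]
      have h2 : max pos p.2 = pos := max_eq_left (hall p (by simp))
      split
      · rw [h2]; exact ih (fun q hq => hall q (by simp [hq]))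
      · exact ih (fun q hq => hall q (by simp [hq]))

theorem mm_step_rcomm (pos : Int) : RightCommutative (mmStep pos) := by
  refine ⟨fun a p q => ?_⟩
  unfold mmStep
  split_ifs <;> first | rfl | rw [max_right_comm]

theorem mm_step_fold_eq (pos : Int) (xs : List (Int × Int)) (a : Int) :
    xs.foldl (mmStep pos) a
      = ((xs.filter (fun p => decide (p.1 ≤ pos + 1))).map (fun p => p.2)).foldl max a := by
  rw [List.foldl_map,
    ← PySem.List.foldl_ite_eq_foldl_filter (fun p : Int × Int => p.1 ≤ pos + 1)
      (fun b p => max b p.2) xs a]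
  rfl

-- A's interval builder is a filter-map
theorem mm_ivs_eq (n : Int) (arr : List Int) :
    minMenIvs n arr = mmFv n (PySem.List.enumerate arr) := by
  unfold minMenIvs mmFv mmIv
  simpa using PySem.List.foldl_append_ite (fun p : Int × Int => p.2 ≠ -1)
    (fun p : Int × Int => (max 0 (p.1 - p.2), min (n - 1) (p.1 + p.2)))
    (PySem.List.enumerate arr) []

-- sorted2 output is nondecreasing in the first component
theorem mm_insertBy_pairwise (x : Int × Int) (ys : List (Int × Int))
    (h : ys.Pairwise (fun a b : Int × Int => a.1 ≤ b.1)) :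
    (PySem.List.insertBy
        (fun a b : Int × Int => decide (a.1 < b.1) || (!decide (b.1 < a.1) && decide (a.2 < b.2)))
        x ys).Pairwise (fun a b : Int × Int => a.1 ≤ b.1) := by
  induction ys with
  | nil => simp [PySem.List.insertBy]
  | cons y t ih =>
      rw [List.pairwise_cons] at h
      by_cases hb : (decide (x.1 < y.1) || (!decide (y.1 < x.1) && decide (x.2 < y.2))) = true
      · rw [PySem.List.insertBy, if_pos hb]
        have hxy : x.1 ≤ y.1 := by
          rcases Bool.or_eq_true_iff.mp hb with h1 | h1
          · exact le_of_lt (of_decide_eq_true h1)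
          · have := (Bool.and_eq_true_iff.mp h1).1
            simp only [Bool.not_eq_true', decide_eq_false_iff_not, not_lt] at this
            exact this
        refine List.Pairwise.cons ?_ (List.Pairwise.cons h.1 h.2)
        intro z hz
        rcases List.mem_cons.mp hz with rfl | hz
        · exact hxy
        · exact le_trans hxy (h.1 z hz)
      · rw [PySem.List.insertBy, if_neg hb]
        have hyx : y.1 ≤ x.1 := by
          simp only [Bool.or_eq_true_iff, Bool.and_eq_true_iff, Bool.not_eq_true',
            decide_eq_true_eq, decide_eq_false_iff_not, not_lt, not_or, not_and_or] at hb
          exact hb.1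
        refine List.Pairwise.cons ?_ (ih h.2)
        intro z hz
        rcases (PySem.List.mem_insertBy _ x z t).mp hz with rfl | hz
        · exact hyx
        · exact h.1 z hz

theorem mm_sorted2_pairwise (v : List (Int × Int)) :
    (PySem.List.sorted2 v (fun p => p.1) (fun p => p.2)).Pairwise (fun a b : Int × Int => a.1 ≤ b.1) := by
  unfold PySem.List.sorted2
  simp only [if_neg (by decide : ¬ (false = true))]
  have : ∀ (xs acc : List (Int × Int)), acc.Pairwise (fun a b : Int × Int => a.1 ≤ b.1) →
      (xs.foldl (fun acc x => PySem.List.insertBy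
        (fun a b : Int × Int => decide (a.1 < b.1) || (!decide (b.1 < a.1) && decide (a.2 < b.2)))
        x acc) acc).Pairwise (fun a b : Int × Int => a.1 ≤ b.1) := by
    intro xs
    induction xs with
    | nil => intro acc h; exact h
    | cons x t ih =>
        intro acc h
        exact ih _ (mm_insertBy_pairwise x acc h)
  exact this v [] (by simp)

-- characterisation of A's inner while loop on a fst-sorted suffix
theorem mm_inner_spec (pos : Int) : ∀ (xs : List (Int × Int)) (reach : Int),
    xs.Pairwise (fun a b : Int × Int => a.1 ≤ b.1) →
    (minMenInner pos reach xs).1 = xs.foldl (mmStep pos) reach ∧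
    reach ≤ (minMenInner pos reach xs).1 ∧
    (∃ pre, xs = pre ++ (minMenInner pos reach xs).2 ∧
        ∀ p ∈ pre, p.1 ≤ pos + 1 ∧ p.2 ≤ (minMenInner pos reach xs).1) ∧
    (∀ l r t, (minMenInner pos reach xs).2 = (l, r) :: t → pos + 1 < l) := by
  intro xs
  induction xs with
  | nil =>
      intro reach _
      refine ⟨rfl, le_refl _, ⟨[], rfl, by simp⟩, ?_⟩
      intro l r t h
      simp [minMenInner] at h
  | cons p t ih =>
      obtain ⟨l, r⟩ := p
      intro reach hpw
      rw [List.pairwise_cons] at hpw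
      by_cases h : l ≤ pos + 1
      · have hunf : minMenInner pos reach ((l, r) :: t) = minMenInner pos (max reach r) t := by
          simp [minMenInner, if_pos h]
        obtain ⟨h1, h2, ⟨pre, hdec, hpre⟩, hstop⟩ := ih (max reach r) hpw.2
        rw [hunf]
        refine ⟨?_, le_trans (le_max_left _ _) h2, ⟨(l, r) :: pre, ?_, ?_⟩, hstop⟩
        · rw [h1]; simp [mmStep, List.foldl_cons, if_pos h]
        · rw [List.cons_append, ← hdec]
        · intro q hq
          rcases List.mem_cons.mp hq with rfl | hq
          · exact ⟨h, le_trans (le_max_right _ _) h2⟩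
          · exact hpre q hq
      · have hunf : minMenInner pos reach ((l, r) :: t) = (reach, (l, r) :: t) := by
          simp [minMenInner, if_neg h]
        rw [hunf]
        refine ⟨?_, le_refl _, ⟨[], rfl, by simp⟩, ?_⟩
        · rw [List.foldl_cons]
          simp only [mmStep, if_neg (by exact h : ¬ (l, r).1 ≤ pos + 1)]
          exact (mm_step_skip pos t reach (fun q hq => by
            have := hpw.1 q hq
            simp only [not_le] at h ⊢
            omega)).symm
        · intro l' r' t' heq
          have : l' = l := by
            have := congrArg (fun (x : List (Int × Int)) => x.headI) heq
            simp at this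
            omega
          omega

-- B's building fold splits into its two components
theorem mm_build_eq (n : Int) (arr : List Int) :
    minMenBuild n arr =
      ((PySem.List.enumerate arr).foldl (mmB1 n) (List.replicate arr.length (-1)),
       (PySem.List.enumerate arr).foldl mmB2 false) := by
  unfold minMenBuild
  rw [show (fun (st : List Int × Bool) (p : Int × Int) =>
      if p.2 ≠ -1 then
        let l := max 0 (p.1 - p.2)
        if l < n then
          let r := min (n - 1) (p.1 + p.2)
          if r > st.1.getD l.toNat (-1) then (st.1.set l.toNat r, true) else (st.1, true)
        else (st.1, true)
      else st)
      = (fun st p => (mmB1 n st.1 p, mmB2 st.2 p)) from ?_]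
  · exact PySem.List.foldl_prod_mk (mmB1 n) mmB2 (PySem.List.enumerate arr)
      (List.replicate arr.length (-1)) false
  · funext st p
    simp only [mmB1, mmB2]
    split_ifs <;> rfl

theorem mm_build_any : ∀ (es : List (Int × Int)) (b : Bool),
    es.foldl mmB2 b = (b || es.any (fun p => p.2 != -1)) := by
  intro es
  induction es with
  | nil => intro b; simp
  | cons p t ih =>
      intro b
      simp only [List.foldl_cons, List.any_cons, mmB2]
      by_cases hp : p.2 = -1
      · simp [hp, ih]
      · simp [hp, ih]

theorem mm_build_len (n : Int) : ∀ (es : List (Int × Int)) (best : List Int),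
    (es.foldl (mmB1 n) best).length = best.length := by
  intro es
  induction es with
  | nil => intro best; rfl
  | cons p t ih =>
      intro best
      rw [List.foldl_cons, ih]
      unfold mmB1
      split_ifs <;> simp

-- KEY: the running max of a prefix of B's bucket array is the max reach of all
-- intervals whose (clamped, hence nonnegative) start lies below the prefix bound
theorem mm_build_take (n : Int) : ∀ (es : List (Int × Int)) (best : List Int) (k : Nat),
    k ≤ best.length → ((best.length : Int)) = n →
    ((es.foldl (mmB1 n) best).take k).foldl max (-1) =
      (((mmFv n es).filter (fun p => decide (p.1 < (k : Int)))).map (fun p => p.2)).foldl max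
        ((best.take k).foldl max (-1)) := by
  intro es
  induction es with
  | nil => intro best k _ _; simp [mmFv]
  | cons p es ih =>
      intro best k hk hn
      by_cases hp : p.2 = -1
      · have hb : mmB1 n best p = best := by simp [mmB1, hp]
        simp only [List.foldl_cons, hb, mmFv, List.filter_cons, hp]
        simpa [mmFv] using ih best k hk hn
      · have hfv : mmFv n (p :: es) = mmIv n p :: mmFv n es := by
          simp [mmFv, hp]
        set l : Int := max 0 (p.1 - p.2) with hldef
        set r : Int := min (n - 1) (p.1 + p.2) with hrdef
        have hl0 : 0 ≤ l := le_max_left _ _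
        have hiv : mmIv n p = (l, r) := rfl
        by_cases hln : l < n
        · have hltoNat : l.toNat < best.length := by omega
          have hgd : best.getD l.toNat (-1) = best[l.toNat] := List.getD_eq_getElem best (-1) hltoNat
          by_cases hlk : l < (k : Int)
          · have hjk : l.toNat < k := by omega
            have htake : (best.take k)[l.toNat]'(by simp; omega) = best[l.toNat] := List.getElem_take
            have hmem : best[l.toNat] ∈ best.take k := by
              rw [← htake]; exact List.getElem_mem _
            have hfilter : (decide (((l, r) : Int × Int).1 < (k : Int))) = true := by
              simpa using hlk
            have hq : ((mmIv n p :: mmFv n es).filter (fun p => decide (p.1 < (k : Int))))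
                = (l, r) :: (mmFv n es).filter (fun p => decide (p.1 < (k : Int))) := by
              rw [hiv, List.filter_cons, if_pos hfilter]
            rw [hfv, List.foldl_cons, hq, List.map_cons, List.foldl_cons]
            by_cases hr : r > best.getD l.toNat (-1)
            · have hb : mmB1 n best p = best.set l.toNat r := by
                simp only [mmB1, ← hldef, ← hrdef, if_pos hp, if_pos hln, if_pos hr]
              rw [hb, ih (best.set l.toNat r) k (by simpa using hk) (by simpa using hn)]
              congr 1
              rw [List.take_set, mm_foldl_max_set (best.take k) l.toNat r (-1)
                (by simp; omega) (by rw [htake]; rw [hgd] at hr; omega)]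
            · have hb : mmB1 n best p = best := by
                simp only [mmB1, ← hldef, ← hrdef, if_pos hp, if_pos hln, if_neg hr]
              rw [hb, ih best k hk hn]
              congr 1
              have hle : best[l.toNat] ≤ (best.take k).foldl max (-1) :=
                (PySem.List.le_foldl_max (best.take k) (-1)).2 _ hmem
              rw [hgd] at hr
              have : r ≤ (best.take k).foldl max (-1) := by omega
              rw [max_eq_left this]
          · -- k ≤ l : the write (if any) lands at or beyond k, the filter drops the interval
            have hfilter : (decide (((l, r) : Int × Int).1 < (k : Int))) = false := by
              simpa using hlk
            have hq : ((mmIv n p :: mmFv n es).filter (fun p => decide (p.1 < (k : Int))))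
                = (mmFv n es).filter (fun p => decide (p.1 < (k : Int))) := by
              rw [hiv, List.filter_cons, if_neg (by simp [hfilter])]
            rw [hfv, List.foldl_cons, hq]
            have hkl : k ≤ l.toNat := by omega
            by_cases hr : r > best.getD l.toNat (-1)
            · have hb : mmB1 n best p = best.set l.toNat r := by
                simp only [mmB1, ← hldef, ← hrdef, if_pos hp, if_pos hln, if_pos hr]
              rw [hb, ih (best.set l.toNat r) k (by simpa using hk) (by simpa using hn)]
              congr 1
              rw [List.take_set, List.set_eq_of_length_le (by simp; omega)]
            · have hb : mmB1 n best p = best := by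
                simp only [mmB1, ← hldef, ← hrdef, if_pos hp, if_pos hln, if_neg hr]
              rw [hb, ih best k hk hn]
        · have hb : mmB1 n best p = best := by
            simp only [mmB1, ← hldef, if_pos hp, if_neg hln]
          have hfilter : (decide (((l, r) : Int × Int).1 < (k : Int))) = false := by
            simp only [decide_eq_false_iff_not, not_lt]
            have : (k : Int) ≤ (best.length : Int) := by exact_mod_cast hk
            omega
          have hq : ((mmIv n p :: mmFv n es).filter (fun p => decide (p.1 < (k : Int))))
              = (mmFv n es).filter (fun p => decide (p.1 < (k : Int))) := by
            rw [hiv, List.filter_cons, if_neg (by simp [hfilter])]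
          rw [hfv, List.foldl_cons, hq, hb]
          exact ih best k hk hn

-- B's inner while loop advances i to min(len(best), covered+2) keeping far = prefix max
theorem mm_innerB_inv (covered : Int) (best : List Int) (hc : -1 ≤ covered) :
    ∀ (fuel i : Nat) (far : Int), best.length - i ≤ fuel →
    i ≤ best.length → (i : Int) ≤ covered + 2 → far = (best.take i).foldl max (-1) →
    minMenInnerB covered best far i =
      ((best.take (min best.length (covered + 2).toNat)).foldl max (-1),
        min best.length (covered + 2).toNat) := by
  intro fuel
  induction fuel with
  | zero =>
      intro i far hfuel hi hi2 hfar
      have hie : i = best.length := by omega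
      rw [minMenInnerB, if_neg (by omega)]
      have : min best.length (covered + 2).toNat = i := by omega
      rw [this, hfar]
  | succ fuel ih =>
      intro i far hfuel hi hi2 hfar
      by_cases hcond : i < best.length ∧ (i : Int) ≤ covered + 1
      · rw [minMenInnerB, if_pos hcond]
        have hgd : best.getD i (-1) = best[i]'hcond.1 := List.getD_eq_getElem best (-1) hcond.1
        have hmaxeq : (if best.getD i (-1) > far then best.getD i (-1) else far)
            = max far (best.getD i (-1)) := by
          by_cases h : best.getD i (-1) ≤ far
          · rw [if_neg (by omega), max_eq_left h]
          · rw [if_pos (by omega), max_eq_right (by omega)]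
        have htake : (best.take (i + 1)).foldl max (-1)
            = max ((best.take i).foldl max (-1)) (best[i]'hcond.1) := by
          rw [List.take_add_one, List.getElem?_eq_getElem hcond.1,
            show (some (best[i]'hcond.1)).toList = [best[i]'hcond.1] from rfl,
            List.foldl_append]
          rfl
        rw [ih (i + 1) _ (by omega) (by omega) (by push_cast; omega)
          (by rw [hmaxeq, hgd, hfar, htake])]
      · rw [minMenInnerB, if_neg hcond]
        have : min best.length (covered + 2).toNat = i := by omega
        rw [this, hfar]

-- after B's inner loop, far is exactly the max reach over intervals starting at ≤ pos+1
theorem mm_far' (arr : List Int) (n : Int) (v0 : List (Int × Int)) (best : List Int)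
    (hn : n = (arr.length : Int))
    (hv0 : v0 = mmFv n (PySem.List.enumerate arr))
    (hbest : best = (PySem.List.enumerate arr).foldl (mmB1 n) (List.replicate arr.length (-1)))
    (pos : Int) (hc : -1 ≤ pos) (hpos : pos < n - 1)
    (k : Nat) (hkdef : k = min best.length (pos + 2).toNat) :
    (best.take k).foldl max (-1)
      = ((v0.filter (fun p => decide (p.1 ≤ pos + 1))).map (fun p => p.2)).foldl max (-1) := by
  have hlenb : best.length = arr.length := by
    rw [hbest, mm_build_len n _ _]; simp
  have hlen2 : ((best.length : Int)) = n := by rw [hlenb, hn]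
  have hk : ((k : Nat) : Int) = pos + 2 := by omega
  rw [hbest, mm_build_take n (PySem.List.enumerate arr) (List.replicate arr.length (-1))
    k (by simp; omega) (by rw [List.length_replicate, ← hn]),
    mm_replicate_fold, ← hv0]
  congr 1
  refine congrArg _ (List.filter_congr ?_)
  intro x _
  rw [hk]
  exact decide_eq_decide.mpr (by omega)

-- MAIN: the two while loops agree, coupled by covered = pos and the invariants
theorem mm_main (arr : List Int) (n : Int) (v0 v : List (Int × Int)) (best : List Int)
    (hn : n = (arr.length : Int))
    (hv0 : v0 = mmFv n (PySem.List.enumerate arr))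
    (hv : v = PySem.List.sorted2 v0 (fun p => p.1) (fun p => p.2))
    (hbest : best = (PySem.List.enumerate arr).foldl (mmB1 n) (List.replicate arr.length (-1))) :
    ∀ (m : Nat) (rest pre : List (Int × Int)) (cnt pos far : Int) (i : Nat),
      rest.length ≤ m → v = pre ++ rest → (∀ p ∈ pre, p.1 ≤ pos + 1 ∧ p.2 ≤ pos) →
      i ≤ best.length → (i : Int) ≤ pos + 2 → far = (best.take i).foldl max (-1) → -1 ≤ pos →
      minMenLoop n cnt pos rest = minMenLoopB n best cnt pos far i := by
  have hlenb : best.length = arr.length := by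
    rw [hbest, mm_build_len n _ _]; simp
  have hpwv : v.Pairwise (fun a b : Int × Int => a.1 ≤ b.1) := by
    rw [hv]; exact mm_sorted2_pairwise v0
  have hperm : v.Perm v0 := by
    rw [hv]; exact PySem.List.sorted2_perm v0 _ _ false
  intro m
  induction m with
  | zero =>
      intro rest pre cnt pos far i hm hsplit hpre hi hi2 hfar hc
      have hnil : rest = [] := List.eq_nil_of_length_eq_zero (by omega)
      subst hnil
      by_cases hpos : pos < n - 1
      · rw [minMenLoop, if_pos hpos, minMenLoopB, if_pos hpos,
          mm_innerB_inv pos best hc best.length i far (by omega) hi hi2 hfar]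
        have hle : (best.take (min best.length (pos + 2).toNat)).foldl max (-1) ≤ pos := by
          rw [mm_far' arr n v0 best hn hv0 hbest pos hc hpos _ rfl]
          refine mm_foldl_max_le _ _ _ (by omega) ?_
          intro x hx
          obtain ⟨p, hp, rfl⟩ := List.mem_map.mp hx
          have hpv : p ∈ v := hperm.mem_iff.mpr (List.mem_filter.mp hp).1
          rw [hsplit] at hpv
          simp only [List.append_nil] at hpv
          exact (hpre p hpv).2
        simp only [if_pos hle]
      · rw [minMenLoop.eq_def, if_neg hpos, minMenLoopB, if_neg hpos]
  | succ m ih =>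
      intro rest pre cnt pos far i hm hsplit hpre hi hi2 hfar hc
      by_cases hpos : pos < n - 1
      · -- unfold B once
        rw [minMenLoopB, if_pos hpos,
          mm_innerB_inv pos best hc best.length i far (by omega) hi hi2 hfar]
        set k' : Nat := min best.length (pos + 2).toNat with hk'def
        set far' : Int := (best.take k').foldl max (-1) with hfar'def
        have hfarW : far' = ((v0.filter (fun p => decide (p.1 ≤ pos + 1))).map
            (fun p => p.2)).foldl max (-1) :=
          mm_far' arr n v0 best hn hv0 hbest pos hc hpos _ hk'def
        have hWle : (∀ p ∈ rest, pos + 1 < p.1) → far' ≤ pos := by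
          intro hall
          rw [hfarW]
          refine mm_foldl_max_le _ _ _ (by omega) ?_
          intro x hx
          obtain ⟨p, hp, rfl⟩ := List.mem_map.mp hx
          have hp1 : decide (p.1 ≤ pos + 1) = true := (List.mem_filter.mp hp).2
          have hpv : p ∈ v := hperm.mem_iff.mpr (List.mem_filter.mp hp).1
          rw [hsplit] at hpv
          rcases List.mem_append.mp hpv with hmem | hmem
          · exact (hpre p hmem).2
          · exact absurd (hall p hmem) (by simpa using hp1)
        rcases rest with _ | ⟨⟨l, r⟩, t⟩
        · rw [minMenLoop.eq_def, if_pos hpos]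
          simp only [if_pos (hWle (by simp))]
        · by_cases hl : l > pos + 1
          · have hall : ∀ p ∈ (l, r) :: t, pos + 1 < p.1 := by
              have hpwr : ((l, r) :: t).Pairwise (fun a b : Int × Int => a.1 ≤ b.1) :=
                ((List.pairwise_append.mp (hsplit ▸ hpwv)).2).1
              rw [List.pairwise_cons] at hpwr
              intro p hp
              rcases List.mem_cons.mp hp with rfl | hp
              · exact hl
              · have := hpwr.1 p hp
                omega
            rw [minMenLoop.eq_def, if_pos hpos]
            simp only [dif_pos hl, if_pos (hWle hall)]
          · -- the interesting round
            have hpwr : ((l, r) :: t).Pairwise (fun a b : Int × Int => a.1 ≤ b.1) :=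
              ((List.pairwise_append.mp (hsplit ▸ hpwv)).2).1
            obtain ⟨hfold, hmono, ⟨cpre, hdec, hcons⟩, hstop⟩ :=
              mm_inner_spec pos ((l, r) :: t) pos hpwr
            set s := minMenInner pos pos ((l, r) :: t) with hsdef
            have hreach : s.1 = max pos far' := by
              rw [hfold]
              have h1 : (pre ++ (l, r) :: t).foldl (mmStep pos) pos
                  = ((l, r) :: t).foldl (mmStep pos) pos := by
                rw [List.foldl_append, mm_step_pre pos pre (fun p hp => (hpre p hp).2)]
              have h2 : v.foldl (mmStep pos) pos = v0.foldl (mmStep pos) pos :=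
                @List.Perm.foldl_eq _ _ (mmStep pos) _ _ (mm_step_rcomm pos) hperm pos
              rw [← h1, ← hsplit, h2, mm_step_fold_eq pos v0 pos]
              rw [show pos = max (-1) pos from (max_eq_right hc).symm, mm_foldl_max_pull,
                max_eq_right hc, max_comm, hfarW]
            rw [minMenLoop.eq_def, if_pos hpos]
            simp only [dif_neg hl]
            rw [← hsdef]
            by_cases hstuck : far' ≤ pos
            · simp only [if_pos hstuck]
              have hr1 : s.1 = pos := by rw [hreach, max_eq_left hstuck]
              rw [minMenLoop.eq_def, if_pos (by omega : s.1 < n - 1)]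
              rcases hs2 : s.2 with _ | ⟨⟨l', r'⟩, t'⟩
              · rfl
              · have := hstop l' r' t' hs2
                simp only [dif_pos (by omega : l' > s.1 + 1)]
            · simp only [if_neg hstuck]
              have hposlt : pos < far' := by omega
              have hr1 : s.1 = far' := by rw [hreach, max_eq_right (le_of_lt hposlt)]
              have hslen : s.2.length ≤ t.length := by
                have hunf : s = minMenInner pos (max pos r) t := by
                  rw [hsdef]; simp [minMenInner, if_pos (by omega : l ≤ pos + 1)]
                rw [hunf]
                exact minMenInner_len pos (max pos r) t
              rw [hr1]
              refine ih s.2 (pre ++ cpre) (cnt + 1) far' far' k' ?_ ?_ ?_ ?_ ?_ rfl (by omega)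
              · have : t.length + 1 ≤ m + 1 := by simpa using hm
                omega
              · rw [hsplit, hdec, List.append_assoc]
              · intro p hp
                rcases List.mem_append.mp hp with hmem | hmem
                · have := hpre p hmem
                  constructor <;> omega
                · have := hcons p hmem
                  rw [hr1] at this
                  constructor <;> omega
              · exact min_le_left _ _
              · have : ((k' : Nat) : Int) = pos + 2 := by
                  have : ((best.length : Int)) = n := by rw [hlenb, hn]
                  omega
                omega
      · rw [minMenLoop.eq_def, if_neg hpos, minMenLoopB, if_neg hpos]

-- ===== VERDICT (by name: the statement is the Claim_ definition above) =====
theorem minMen_spec : Claim_equal_minMen := by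
  unfold Claim_equal_minMen Spec_minMen
  intro arr _
  have hbe := mm_build_eq ((arr.length : Nat) : Int) arr
  have hany : (minMenBuild ((arr.length : Nat) : Int) arr).2
      = (PySem.List.enumerate arr).any (fun p => p.2 != -1) := by
    rw [hbe]
    simpa using mm_build_any (PySem.List.enumerate arr) false
  have hiff : minMenIvs ((arr.length : Nat) : Int) arr = []
      ↔ (minMenBuild ((arr.length : Nat) : Int) arr).2 = false := by
    rw [mm_ivs_eq, hany]
    unfold mmFv
    rw [List.map_eq_nil_iff, List.filter_eq_nil_iff, List.any_eq_false]
    constructor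
    · intro h p hp; simpa using h p hp
    · intro h p hp; simpa using h p hp
  simp only [minMen, minMen_alt]
  by_cases hv : minMenIvs ((arr.length : Nat) : Int) arr = []
  · rw [if_pos hv, if_pos (hiff.mp hv)]
  · rw [if_neg hv, if_neg (fun h => hv (hiff.mpr h)),
      show (minMenBuild ((arr.length : Nat) : Int) arr).1
          = (PySem.List.enumerate arr).foldl (mmB1 ((arr.length : Nat) : Int))
              (List.replicate arr.length (-1)) from by rw [hbe]]
    exact mm_main arr ((arr.length : Nat) : Int)
      (mmFv ((arr.length : Nat) : Int) (PySem.List.enumerate arr))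
      (PySem.List.sorted2 (minMenIvs ((arr.length : Nat) : Int) arr)
        (fun p => p.1) (fun p => p.2))
      ((PySem.List.enumerate arr).foldl (mmB1 ((arr.length : Nat) : Int))
        (List.replicate arr.length (-1)))
      rfl rfl (by rw [mm_ivs_eq]) rfl
      (PySem.List.sorted2 (minMenIvs ((arr.length : Nat) : Int) arr)
        (fun p => p.1) (fun p => p.2)).length
      _ [] 0 (-1) (-1) 0 (le_refl _) (by simp) (by simp) (Nat.zero_le _) (by norm_num) rfl
      (le_refl _)
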